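-- pv_equiv track=rewrite | github.com/QinSD-TJU-Chem-BAMS/FISD-Core-Scripts-and-Datasets | scripts/Glycan_Formula.py | calc_composition_GPSeeker
-- ===== SOURCE A (Python) =====
-- def calc_composition_GPSeeker(glycan: str) -> tuple[int, int, int, int, int]:
--     N_number = 0
--     H_number = 0
--     F_number = 0
--     A_number = 0
--     G_number = 0
--     for code in glycan:
--         if code == 'M' or code == 'L' or code == 'G':
--             H_number += 1
--         elif code == 'Y' or code == 'V':
--             N_number += 1
--         elif code == 'F':
--             F_number += 1
--         elif code == 'S':
--             A_number += 1
--         elif code == 'T':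
--             G_number += 1
--     return (N_number, H_number, F_number, A_number, G_number)
-- ===== SOURCE B (Python) =====
-- def calc_composition_GPSeeker(glycan: str) -> tuple[int, int, int, int, int]:
--     return (glycan.count('Y') + glycan.count('V'),
--             glycan.count('M') + glycan.count('L') + glycan.count('G'),
--             glycan.count('F'),
--             glycan.count('S'),
--             glycan.count('T'))
-- ===== Notes on version B (the rewrite author's own statement) =====
-- stated objective: idiomatic
-- what changed: Replaces the single explicit Python-level character loop with five accumulators and an if/elif chain by seven independent str.count scans combined arithmetically into the tuple; B has no Python loop or accumulator at all, and the C-implemented scans give a measured constant-factor speedup.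
import Mathlib
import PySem

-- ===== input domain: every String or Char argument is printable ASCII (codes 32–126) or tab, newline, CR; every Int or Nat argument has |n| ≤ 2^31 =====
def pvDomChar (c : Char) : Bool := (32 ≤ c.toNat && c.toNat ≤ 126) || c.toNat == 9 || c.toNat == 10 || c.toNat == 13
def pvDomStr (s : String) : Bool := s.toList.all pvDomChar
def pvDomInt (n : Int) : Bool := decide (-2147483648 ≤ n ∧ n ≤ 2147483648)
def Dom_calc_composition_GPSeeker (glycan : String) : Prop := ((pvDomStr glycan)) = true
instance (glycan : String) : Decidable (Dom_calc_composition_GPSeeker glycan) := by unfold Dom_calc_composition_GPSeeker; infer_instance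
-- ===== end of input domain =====

-- B replaces the if/elif accumulator loop by seven independent str.count scans combined arithmetically (idiomatic; a timing run measured B faster).


-- ===== PORT A =====
def calc_composition_GPSeeker (glycan : String) : Int × Int × Int × Int × Int :=
  glycan.toList.foldl
    (fun (acc : Int × Int × Int × Int × Int) code =>
      let (n, h, f, a, g) := acc
      if code = 'M' ∨ code = 'L' ∨ code = 'G' then (n, h + 1, f, a, g)
      else if code = 'Y' ∨ code = 'V' then (n + 1, h, f, a, g)
      else if code = 'F' then (n, h, f + 1, a, g)
      else if code = 'S' then (n, h, f, a + 1, g)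
      else if code = 'T' then (n, h, f, a, g + 1)
      else (n, h, f, a, g))
    (0, 0, 0, 0, 0)

-- ===== PORT B =====
def calc_composition_GPSeeker_alt (glycan : String) : Int × Int × Int × Int × Int :=
  ((PySem.Str.count glycan "Y" : Int) + (PySem.Str.count glycan "V" : Int),
   (PySem.Str.count glycan "M" : Int) + (PySem.Str.count glycan "L" : Int) + (PySem.Str.count glycan "G" : Int),
   (PySem.Str.count glycan "F" : Int),
   (PySem.Str.count glycan "S" : Int),
   (PySem.Str.count glycan "T" : Int))

-- ===== PRECONDITION & SPEC =====
def Spec_calc_composition_GPSeeker (glycan : String) (out : Int × Int × Int × Int × Int) : Prop := out = calc_composition_GPSeeker_alt glycan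
instance (glycan : String) (out : Int × Int × Int × Int × Int) : Decidable (Spec_calc_composition_GPSeeker glycan out) := by unfold Spec_calc_composition_GPSeeker; infer_instance

-- ===== CLAIM (what is proved, stated in full; the proofs are below) =====
def Claim_equal_calc_composition_GPSeeker : Prop := ∀ (glycan : String), Dom_calc_composition_GPSeeker glycan → Spec_calc_composition_GPSeeker glycan (calc_composition_GPSeeker glycan)

-- ===== LEMMAS AND PROOFS =====

-- The A-side fold adds per-character counts to its accumulator.
theorem pv_foldA (l : List Char) (n h f a g : Int) :
    l.foldl
      (fun (acc : Int × Int × Int × Int × Int) code =>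
        let (n, h, f, a, g) := acc
        if code = 'M' ∨ code = 'L' ∨ code = 'G' then (n, h + 1, f, a, g)
        else if code = 'Y' ∨ code = 'V' then (n + 1, h, f, a, g)
        else if code = 'F' then (n, h, f + 1, a, g)
        else if code = 'S' then (n, h, f, a + 1, g)
        else if code = 'T' then (n, h, f, a, g + 1)
        else (n, h, f, a, g))
      (n, h, f, a, g)
    = (n + l.count 'Y' + l.count 'V',
       h + l.count 'M' + l.count 'L' + l.count 'G',
       f + l.count 'F', a + l.count 'S', g + l.count 'T') := by
  induction l generalizing n h f a g with
  | nil => simp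
  | cons c t ih =>
    simp only [List.foldl_cons, List.count_cons]
    by_cases hM : c = 'M' ∨ c = 'L' ∨ c = 'G'
    · rcases hM with h1 | h1 | h1 <;> subst h1 <;> simp [ih] <;> omega
    · by_cases hY : c = 'Y' ∨ c = 'V'
      · rcases hY with h1 | h1 <;> subst h1 <;> simp [ih] <;> omega
      · by_cases hF : c = 'F'
        · subst hF; simp [hM, ih]; omega
        · by_cases hS : c = 'S'
          · subst hS; simp [hF, ih]; omega
          · by_cases hT : c = 'T'
            · subst hT; simp [hF, hS, ih]; omega
            · push_neg at hM hY
              simp [hM.1, hM.2.1, hM.2.2, hY.1, hY.2, hF, hS, hT, ih]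

-- Python's str.count specialised to a one-character substring is List.count.
theorem pv_go_single (c : Char) (l : List Char) (acc : Nat) :
    PySem.Chars.count.go [c] l.length l acc = acc + l.count c := by
  induction l generalizing acc with
  | nil => simp [PySem.Chars.count.go]
  | cons h t ih =>
    rw [List.length_cons, PySem.Chars.count.go]
    by_cases hc : c = h
    · subst hc; simp [List.isPrefixOf, ih]; omega
    · simp [List.isPrefixOf, Ne.symm hc, ih, hc]

theorem pv_count_single (c : Char) (s : String) :
    PySem.Str.count s (String.ofList [c]) = s.toList.count c := by
  rw [PySem.Str.count_eq]
  have := pv_go_single c s.toList 0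
  simp only [PySem.Chars.count, List.isEmpty_cons, if_false, Bool.false_eq_true]
  simpa using this

-- ===== VERDICT (by name: the statement is the Claim_ definition above) =====
theorem calc_composition_GPSeeker_spec : Claim_equal_calc_composition_GPSeeker := by
  intro glycan _
  unfold Spec_calc_composition_GPSeeker calc_composition_GPSeeker calc_composition_GPSeeker_alt
  rw [pv_foldA]
  have h : ∀ c : Char, PySem.Str.count glycan (String.ofList [c]) = glycan.toList.count c :=
    fun c => pv_count_single c glycan
  simp only [show ("Y":String) = String.ofList ['Y'] from rfl, show ("V":String) = String.ofList ['V'] from rfl,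
    show ("M":String) = String.ofList ['M'] from rfl, show ("L":String) = String.ofList ['L'] from rfl,
    show ("G":String) = String.ofList ['G'] from rfl, show ("F":String) = String.ofList ['F'] from rfl,
    show ("S":String) = String.ofList ['S'] from rfl, show ("T":String) = String.ofList ['T'] from rfl, h,
    Prod.mk.injEq]
  refine ⟨by omega, by omega, by omega, by omega, by omega⟩
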